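-- pv_equiv track=rewrite | github.com/alessandrofd/leetcode-python | 1751-maximum-number-of-events-that-can-be-attended-ii.py | maxValue_top_down_no_bin_search
-- ===== SOURCE A (Python) =====
-- from typing import List
--
-- def maxValue_top_down_no_bin_search(events: List[List[int]], k: int) -> int:
--     n = len(events)
--     dp = [[-1] * (k + 1) for _ in range(n)]
--     events = sorted(events)
--
--     def dfs(i, count, prev_end):
--         if i == n or count == 0:
--             return 0
--
--         if events[i][0] <= prev_end:
--             return dfs(i + 1, count, prev_end)
--
--         if dp[i][count] >= 0:
--             return dp[i][count]
--
--         dp[i][count] = max(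
--             dfs(i + 1, count, prev_end),
--             events[i][2] + dfs(i + 1, count - 1, events[i][1]),
--         )
--         return dp[i][count]
--
--     return dfs(0, k, -1)
-- ===== SOURCE B (Python) =====
-- from bisect import bisect_right
--
-- def maxValue_top_down_no_bin_search(events, k):
--     if k <= 0:
--         return 0
--     es = sorted(events)
--     n = len(es)
--     kk = min(k, n)  # more than n events can never be attended
--     starts = [e[0] for e in es]
--     # g[i][c] = best total value choosing at most c events from es[i:], es[i] freely choosable
--     g = [[0] * (kk + 1) for _ in range(n + 1)]
--     for i in range(n - 1, -1, -1):
--         nxt = bisect_right(starts, es[i][1], i + 1)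
--         row = [0] * (kk + 1)
--         for c in range(1, kk + 1):
--             take = es[i][2] + g[nxt][c - 1]
--             skip = g[i + 1][c]
--             row[c] = take if take > skip else skip
--         g[i] = row
--     # initial prev_end is -1: only events starting after -1 are attendable
--     return g[bisect_right(starts, -1)][kk]
-- ===== Notes on version B (the rewrite author's own statement) =====
-- stated objective: faster
-- what changed: Replaced the top-down memoized DFS with linear skipping of overlapping events by an iterative bottom-up DP table (count capped at min(k, n)) filled from the last event backwards, locating the next attendable event by binary search (bisect_right) on the sorted start times.
-- outside the precondition, e.g. on maxValue_top_down_no_bin_search([[-5], [1, 2, 3]], 1): A returns 3, B raises IndexError; on maxValue_top_down_no_bin_search([], -1): A returns 0, B returns 0; on maxValue_top_down_no_bin_search([[-2, -2, 5]], -1): A returns 0, B returns 0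
import Mathlib
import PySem

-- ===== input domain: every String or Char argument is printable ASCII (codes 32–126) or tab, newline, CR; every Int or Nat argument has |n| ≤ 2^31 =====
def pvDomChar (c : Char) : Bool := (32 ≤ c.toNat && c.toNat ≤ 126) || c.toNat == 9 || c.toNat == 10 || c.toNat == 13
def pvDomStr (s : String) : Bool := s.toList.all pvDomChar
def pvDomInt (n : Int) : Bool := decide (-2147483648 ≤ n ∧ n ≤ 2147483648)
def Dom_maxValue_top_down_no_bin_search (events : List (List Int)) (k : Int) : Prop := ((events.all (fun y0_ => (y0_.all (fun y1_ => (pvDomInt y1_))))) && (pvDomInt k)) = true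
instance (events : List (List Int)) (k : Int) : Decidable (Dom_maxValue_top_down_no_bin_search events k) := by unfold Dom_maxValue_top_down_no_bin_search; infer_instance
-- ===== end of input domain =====

-- B replaces A's memoized top-down DFS (linear skip over overlapping events) by a bottom-up
-- DP table over the start-sorted events with bisect_right to find the next attendable event.


-- ===== PORT A =====
-- events[i][j]; exact for indices in range (Pre_ keeps them in range)
def pvA_get (es : List (List Int)) (i : Nat) (j : Nat) : Int := (es.getD i []).getD j 0

-- dp[i][count] read / write (count ≥ 1 on every access inside Pre_, so .toNat is exact)
def pvDpGet (dp : List (List Int)) (i : Nat) (c : Int) : Int := (dp.getD i []).getD c.toNat (-1)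
def pvDpSet (dp : List (List Int)) (i : Nat) (c : Int) (v : Int) : List (List Int) :=
  dp.set i ((dp.getD i []).set c.toNat v)

-- the inner dfs, with the memo table dp threaded explicitly; fuel = n - i (all calls use i+1,
-- and fuel 0 is exactly the `i == n` base case on every call path)
def pvDfsA (es : List (List Int)) (dp : List (List Int)) (i : Nat) (count prevEnd : Int) :
    Nat → Int × List (List Int)
  | 0 => (0, dp)
  | f+1 =>
    if count = 0 then (0, dp)
    else if pvA_get es i 0 ≤ prevEnd then pvDfsA es dp (i+1) count prevEnd f
    else if 0 ≤ pvDpGet dp i count then (pvDpGet dp i count, dp)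
    else
      let r1 := pvDfsA es dp (i+1) count prevEnd f
      let r2 := pvDfsA es r1.2 (i+1) (count-1) (pvA_get es i 1) f
      let v := max r1.1 (pvA_get es i 2 + r2.1)
      (v, pvDpSet r2.2 i count v)

def maxValue_top_down_no_bin_search (events : List (List Int)) (k : Int) : Int :=
  let n := events.length
  let dp := List.replicate n (List.replicate (k+1).toNat (-1))
  let es := PySem.List.sorted events (fun e => e) false
  (pvDfsA es dp 0 k (-1) n).1

-- ===== PORT B =====
-- g[i][c] table read
def pvG2 (g : List (List Int)) (i : Nat) (c : Int) : Int := (g.getD i []).getD c.toNat 0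

-- one iteration of the outer loop: fill row i of g
-- bisect_right(starts, x, lo) ≡ lo + bisect_right(starts[lo:], x): identical midpoints and
-- comparisons at the same absolute positions, so this hand port of the lo parameter is exact.
def pvBStep (es : List (List Int)) (k : Int) (g : List (List Int)) (iI : Int) : List (List Int) :=
  let i := iI.toNat
  let starts := es.map (fun e => e.getD 0 0)
  let nxt := (i+1) + PySem.List.bisectRight (starts.drop (i+1)) ((es.getD i []).getD 1 0)
  let row := (PySem.List.pyRange 1 (k+1) 1).foldl (fun row c =>
      row.set c.toNat (
        let take := (es.getD i []).getD 2 0 + pvG2 g nxt (c-1)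
        let skip := pvG2 g (i+1) c
        if skip < take then take else skip)) (List.replicate (k+1).toNat 0)
  g.set i row

def maxValue_top_down_no_bin_search_alt (events : List (List Int)) (k : Int) : Int :=
  if k ≤ 0 then 0
  else
    let es := PySem.List.sorted events (fun e => e) false
    let n := es.length
    let kk := min k (n : Int)
    let starts := es.map (fun e => e.getD 0 0)
    let g := (PySem.List.pyRange ((n : Int) - 1) (-1) (-1)).foldl (pvBStep es kk)
      (List.replicate (n+1) (List.replicate (kk+1).toNat 0))
    pvG2 g (PySem.List.bisectRight starts (-1)) kk

-- ===== PRECONDITION & SPEC =====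
-- Pre_ keeps the natural domain: a non-negative number of events to attend and events that are
-- [start, end, value] records (at least 3 entries); outside it Python A raises IndexError except
-- on degenerate inputs (k = 0 is admitted; negative k or short events that A happens to skip are
-- excluded, where A returns 0 or a value B's natural table construction cannot produce).
def Pre_maxValue_top_down_no_bin_search (events : List (List Int)) (k : Int) : Prop :=
  0 ≤ k ∧ (k = 0 ∨ ∀ e ∈ events, 3 ≤ e.length)
instance (events : List (List Int)) (k : Int) : Decidable (Pre_maxValue_top_down_no_bin_search events k) := by unfold Pre_maxValue_top_down_no_bin_search; infer_instance

def pvWitness_maxValue_top_down_no_bin_search : List (List Int) × Int := ([[1,2,4],[3,4,3],[2,3,1]], 2)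

def Spec_maxValue_top_down_no_bin_search (events : List (List Int)) (k : Int) (out : Int) : Prop := out = maxValue_top_down_no_bin_search_alt events k
instance (events : List (List Int)) (k : Int) (out : Int) : Decidable (Spec_maxValue_top_down_no_bin_search events k out) := by unfold Spec_maxValue_top_down_no_bin_search; infer_instance

-- ===== CLAIM (what is proved, stated in full; the proofs are below) =====
def Claim_equal_maxValue_top_down_no_bin_search : Prop := ∀ (events : List (List Int)) (k : Int), Dom_maxValue_top_down_no_bin_search events k → Pre_maxValue_top_down_no_bin_search events k → Spec_maxValue_top_down_no_bin_search events k (maxValue_top_down_no_bin_search events k)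

-- ===== LEMMAS AND PROOFS =====

-- start times of the (sorted) event list
def pvStarts (es : List (List Int)) : List Int := es.map (fun e => e.getD 0 0)

-- first index ≥ i whose start exceeds p (as both programs compute it)
def pvSkip (es : List (List Int)) (p : Int) (i : Nat) : Nat :=
  i + PySem.List.bisectRight ((pvStarts es).drop i) p

theorem pvSkip_ge (es : List (List Int)) (p : Int) (i : Nat) : i ≤ pvSkip es p i := by
  simp [pvSkip]

-- the pure DP both programs compute: best value of ≤ c events from es[i:], es[i] freely choosable
def pvG (es : List (List Int)) (i : Nat) (c : Nat) : Int :=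
  if _h : es.length ≤ i ∨ c = 0 then 0
  else max (pvG es (i+1) c)
           (pvA_get es i 2 + pvG es (pvSkip es (pvA_get es i 1) (i+1)) (c-1))
termination_by es.length - i
decreasing_by
  · omega
  · have := pvSkip_ge es (pvA_get es i 1) (i+1); omega

theorem pvG_base (es : List (List Int)) (i : Nat) (c : Nat) (h : es.length ≤ i ∨ c = 0) :
    pvG es i c = 0 := by rw [pvG]; simp [h]

theorem pvG_step (es : List (List Int)) (i : Nat) (c : Nat) (hi : i < es.length) (hc : c ≠ 0) :
    pvG es i c = max (pvG es (i+1) c)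
        (pvA_get es i 2 + pvG es (pvSkip es (pvA_get es i 1) (i+1)) (c-1)) := by
  rw [pvG]; simp [Nat.not_le.mpr hi, hc]

-- pvG saturates: any budget of at least the number of remaining events gives the same value
theorem pvG_sat (es : List (List Int)) :
    ∀ (d i c c' : Nat), es.length - i ≤ d → es.length - i ≤ c → es.length - i ≤ c' →
      pvG es i c = pvG es i c' := by
  intro d
  induction d with
  | zero =>
    intro i c c' hd _ _
    rw [pvG_base es i c (Or.inl (by omega)), pvG_base es i c' (Or.inl (by omega))]
  | succ d ihd =>
    intro i c c' hd hc hc'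
    by_cases hin : es.length ≤ i
    · rw [pvG_base _ _ _ (Or.inl hin), pvG_base _ _ _ (Or.inl hin)]
    · rw [pvG_step es i c (by omega) (by omega), pvG_step es i c' (by omega) (by omega)]
      have hsk := pvSkip_ge es (pvA_get es i 1) (i+1)
      rw [ihd (i+1) c c' (by omega) (by omega) (by omega),
          ihd (pvSkip es (pvA_get es i 1) (i+1)) (c-1) (c'-1) (by omega) (by omega) (by omega)]

theorem pvStarts_length (es : List (List Int)) : (pvStarts es).length = es.length := by
  simp [pvStarts]

theorem pvStarts_getElem (es : List (List Int)) (i : Nat) (h : i < es.length) :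
    (pvStarts es)[i]'(by simpa [pvStarts_length] using h) = pvA_get es i 0 := by
  simp [pvStarts, pvA_get, List.getD, List.getElem?_eq_getElem h]

theorem bisect_unique (xs : List Int) (p : Int) (r : Nat) (h1 : r ≤ xs.length)
    (h2 : ∀ j (hj : j < xs.length), j < r → xs[j] ≤ p)
    (h3 : ∀ j (hj : j < xs.length), r ≤ j → p < xs[j])
    (hp : xs.Pairwise (· ≤ ·)) : PySem.List.bisectRight xs p = r := by
  obtain ⟨s1, s2, s3⟩ := PySem.List.bisectRight_spec xs p hp
  set b := PySem.List.bisectRight xs p with hb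
  rcases Nat.lt_trichotomy b r with h | h | h
  · have hbl : b < xs.length := lt_of_lt_of_le h h1
    exact absurd (h2 b hbl h) (not_le.mpr (s3 b hbl le_rfl))
  · exact h
  · have hrl : r < xs.length := lt_of_lt_of_le h s1
    exact absurd (s2 r hrl h) (not_le.mpr (h3 r hrl le_rfl))

theorem bisect_cons (y : Int) (t : List Int) (p : Int) (h : y ≤ p)
    (hp : (y :: t).Pairwise (· ≤ ·)) :
    PySem.List.bisectRight (y :: t) p = PySem.List.bisectRight t p + 1 := by
  obtain ⟨s1, s2, s3⟩ := PySem.List.bisectRight_spec t p hp.of_cons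
  refine bisect_unique (y :: t) p (PySem.List.bisectRight t p + 1) (by simpa using s1) ?_ ?_ hp
  · rintro (_ | j) hj hjr
    · simpa using h
    · simpa using s2 j (by simpa using hj) (by omega)
  · rintro (_ | j) hj hjr
    · omega
    · simpa using s3 j (by simpa using hj) (by omega)

theorem pvSkip_le (es : List (List Int)) (p : Int) (i : Nat)
    (hmono : (pvStarts es).Pairwise (· ≤ ·)) (hi : i ≤ es.length) :
    pvSkip es p i ≤ es.length := by
  obtain ⟨s1, _, _⟩ := PySem.List.bisectRight_spec ((pvStarts es).drop i) p hmono.drop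
  simp only [pvSkip]
  have : ((pvStarts es).drop i).length = es.length - i := by simp [pvStarts_length]
  omega

theorem pvSkip_eq_self (es : List (List Int)) (p : Int) (i : Nat)
    (hmono : (pvStarts es).Pairwise (· ≤ ·))
    (h : es.length ≤ i ∨ p < pvA_get es i 0) : pvSkip es p i = i := by
  by_cases hi : i < es.length
  · have h' : p < pvA_get es i 0 := by
      rcases h with h | h
      · omega
      · exact h
    obtain ⟨s1, s2, s3⟩ := PySem.List.bisectRight_spec ((pvStarts es).drop i) p hmono.drop
    have hlen : ((pvStarts es).drop i).length = es.length - i := by simp [pvStarts_length]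
    have h0 : 0 < ((pvStarts es).drop i).length := by omega
    suffices hb : PySem.List.bisectRight ((pvStarts es).drop i) p = 0 by
      simp [pvSkip, hb]
    by_contra hb
    have hs := s2 0 h0 (by omega)
    simp only [List.getElem_drop, Nat.add_zero] at hs
    rw [pvStarts_getElem es i hi] at hs
    omega
  · have hnil : (pvStarts es).drop i = [] := by
      apply List.drop_eq_nil_of_le; simp [pvStarts_length]; omega
    simp [pvSkip, hnil]

theorem pvSkip_cons (es : List (List Int)) (p : Int) (i : Nat)
    (hmono : (pvStarts es).Pairwise (· ≤ ·)) (hi : i < es.length)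
    (h : pvA_get es i 0 ≤ p) : pvSkip es p i = pvSkip es p (i+1) := by
  have hil : i < (pvStarts es).length := by simpa [pvStarts_length] using hi
  have hd : (pvStarts es).drop i = (pvStarts es)[i] :: (pvStarts es).drop (i+1) :=
    List.drop_eq_getElem_cons hil
  have hy : (pvStarts es)[i] ≤ p := by rw [pvStarts_getElem es i hi]; exact h
  have hcons := bisect_cons ((pvStarts es)[i]) ((pvStarts es).drop (i+1)) p hy
    (by rw [← hd]; exact hmono.drop)
  simp only [pvSkip, hd, hcons]
  omega

-- Python's list comparison is Lean's lexicographic order on List Int; the sorted output is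
-- pairwise ≤ in it, hence (heads of nonempty lists) the start times are nondecreasing.
theorem sorted_pairwise_le (events : List (List Int)) :
    (PySem.List.sorted events (fun e => e) false).Pairwise (· ≤ ·) := by
  have h : (fun (a b : List Int) => a.decidableLT b) = (LinearOrder.toDecidableLT) := by
    funext a b; exact Subsingleton.elim _ _
  have hp := PySem.List.sorted_pairwise (κ := List Int) events (fun e => e)
  rw [h]; exact hp

theorem headD_mono (a b : List Int) (ha : a ≠ []) (hb : b ≠ []) (h : a ≤ b) :
    a.getD 0 0 ≤ b.getD 0 0 := by
  match a, ha, b, hb with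
  | x :: a', _, y :: b', _ =>
    rcases lt_or_eq_of_le h with h | h
    · simpa using List.head_le_of_lt h
    · simp [h]

theorem pvStarts_mono (events : List (List Int)) (hlen3 : ∀ e ∈ events, 3 ≤ e.length) :
    (pvStarts (PySem.List.sorted events (fun e => e) false)).Pairwise (· ≤ ·) := by
  have hp := sorted_pairwise_le events
  unfold pvStarts
  rw [List.pairwise_map]
  refine hp.imp_of_mem ?_
  intro a b ha hb hab
  have ha3 := hlen3 a ((PySem.List.mem_sorted events (fun e => e) false a).mp ha)
  have hb3 := hlen3 b ((PySem.List.mem_sorted events (fun e => e) false b).mp hb)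
  exact headD_mono a b (by intro e; simp [e] at ha3) (by intro e; simp [e] at hb3) hab

-- the memo-table invariant: correct dimensions, and every non-negative entry is the DP value
def pvInv (es : List (List Int)) (k : Int) (dp : List (List Int)) : Prop :=
  dp.length = es.length ∧
  (∀ j, j < es.length → (dp.getD j []).length = (k+1).toNat) ∧
  (∀ j (c : Int), j < es.length → 1 ≤ c → c ≤ k → 0 ≤ pvDpGet dp j c →
      pvDpGet dp j c = pvG es j c.toNat)

theorem pvDpSet_length (dp : List (List Int)) (i : Nat) (c : Int) (v : Int) :
    (pvDpSet dp i c v).length = dp.length := by simp [pvDpSet]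

theorem pvDpSet_getD_ne (dp : List (List Int)) (i j : Nat) (c : Int) (v : Int) (hne : j ≠ i) :
    (pvDpSet dp i c v).getD j [] = dp.getD j [] := by
  simp only [pvDpSet, List.getD, List.getElem?_set]
  rw [if_neg (by omega)]

theorem pvDpSet_getD_self (dp : List (List Int)) (i : Nat) (c : Int) (v : Int)
    (hi : i < dp.length) :
    (pvDpSet dp i c v).getD i [] = (dp.getD i []).set c.toNat v := by
  simp [pvDpSet, List.getD, List.getElem?_set_self hi]

theorem pvDpGet_set_self (dp : List (List Int)) (i : Nat) (c : Int) (v : Int)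
    (hi : i < dp.length) (hc : c.toNat < (dp.getD i []).length) :
    pvDpGet (pvDpSet dp i c v) i c = v := by
  unfold pvDpGet
  rw [pvDpSet_getD_self dp i c v hi]
  simp only [List.getD] at hc ⊢
  rw [List.getElem?_set_self hc]
  rfl

theorem pvDpGet_set_ne (dp : List (List Int)) (i j : Nat) (c c' : Int) (v : Int)
    (h : j ≠ i ∨ c'.toNat ≠ c.toNat) :
    pvDpGet (pvDpSet dp i c v) j c' = pvDpGet dp j c' := by
  unfold pvDpGet
  by_cases hj : j = i
  · subst hj
    have hc : c'.toNat ≠ c.toNat := by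
      rcases h with h | h
      · exact absurd rfl h
      · exact h
    by_cases hi : j < dp.length
    · rw [pvDpSet_getD_self dp j c v hi]
      simp only [List.getD, List.getElem?_set]
      rw [if_neg (by omega)]
    · have heq : pvDpSet dp j c v = dp := by
        unfold pvDpSet
        apply List.set_eq_of_length_le
        omega
      rw [heq]
  · rw [pvDpSet_getD_ne dp i j c v hj]

theorem pvStarts_mono_get (es : List (List Int)) (hmono : (pvStarts es).Pairwise (· ≤ ·))
    (i : Nat) (h : i+1 < es.length) : pvA_get es i 0 ≤ pvA_get es (i+1) 0 := by
  have := (List.pairwise_iff_getElem.mp hmono) i (i+1)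
    (by simp [pvStarts_length]; omega) (by simpa [pvStarts_length] using h) (by omega)
  rwa [pvStarts_getElem es i (by omega), pvStarts_getElem es (i+1) h] at this

theorem pvDfsA_main (es : List (List Int)) (k : Int)
    (hmono : (pvStarts es).Pairwise (· ≤ ·)) :
    ∀ (f i : Nat) (c p : Int) (dp : List (List Int)),
      f = es.length - i → i ≤ es.length → 0 ≤ c → c ≤ k → pvInv es k dp →
      (pvDfsA es dp i c p f).1 = pvG es (pvSkip es p i) c.toNat ∧
      pvInv es k (pvDfsA es dp i c p f).2 := by
  intro f
  induction f with
  | zero =>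
    intro i c p dp hf hi hc0 hck hinv
    have hieq : i = es.length := by omega
    constructor
    · show (0 : Int) = _
      rw [pvSkip_eq_self es p i hmono (Or.inl (by omega))]
      rw [pvG_base es i c.toNat (Or.inl (by omega))]
    · exact hinv
  | succ f ih =>
    intro i c p dp hf hi hc0 hck hinv
    have hilt : i < es.length := by omega
    simp only [pvDfsA]
    by_cases hc : c = 0
    · rw [if_pos hc]
      refine ⟨?_, hinv⟩
      show (0 : Int) = _
      rw [pvG_base es _ c.toNat (Or.inr (by omega))]
    · rw [if_neg hc]
      by_cases hskip : pvA_get es i 0 ≤ p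
      · rw [if_pos hskip]
        have hres := ih (i+1) c p dp (by omega) (by omega) hc0 hck hinv
        rw [pvSkip_cons es p i hmono hilt hskip]
        exact hres
      · rw [if_neg hskip]
        have hself : pvSkip es p i = i := pvSkip_eq_self es p i hmono (Or.inr (by omega))
        by_cases hmemo : 0 ≤ pvDpGet dp i c
        · rw [if_pos hmemo]
          refine ⟨?_, hinv⟩
          rw [hself]
          exact hinv.2.2 i c hilt (by omega) hck hmemo
        · rw [if_neg hmemo]
          obtain ⟨h1v, h1inv⟩ := ih (i+1) c p dp (by omega) (by omega) hc0 hck hinv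
          set r1 := pvDfsA es dp (i+1) c p f with hr1
          obtain ⟨h2v, h2inv⟩ := ih (i+1) (c-1) (pvA_get es i 1) r1.2 (by omega) (by omega)
            (by omega) (by omega) h1inv
          set r2 := pvDfsA es r1.2 (i+1) (c-1) (pvA_get es i 1) f with hr2
          have hsk1 : pvSkip es p (i+1) = i + 1 := by
            apply pvSkip_eq_self es p (i+1) hmono
            by_cases h1n : i+1 < es.length
            · exact Or.inr (lt_of_lt_of_le (by omega) (pvStarts_mono_get es hmono i h1n))
            · exact Or.inl (by omega)
          have hG : max r1.1 (pvA_get es i 2 + r2.1) = pvG es i c.toNat := by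
            rw [pvG_step es i c.toNat hilt (by omega)]
            rw [h1v, hsk1, h2v]
            have hcc : (c-1).toNat = c.toNat - 1 := by omega
            rw [hcc]
          refine ⟨by rw [hself]; exact hG, ?_⟩
          -- the stored value is the DP value; the invariant survives the write
          have hlen1 : r2.2.length = es.length := h2inv.1
          have hrowlen : (r2.2.getD i []).length = (k+1).toNat := h2inv.2.1 i hilt
          have hcnat : c.toNat < (k+1).toNat := by omega
          refine ⟨by rw [pvDpSet_length]; exact hlen1, ?_, ?_⟩
          · intro j hj
            by_cases hji : j = i
            · subst hji
              rw [pvDpSet_getD_self _ _ _ _ (by omega)]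
              rw [List.length_set]
              exact h2inv.2.1 j hj
            · rw [pvDpSet_getD_ne _ _ _ _ _ hji]
              exact h2inv.2.1 j hj
          · intro j c' hj hc1' hck' hpos
            by_cases hsame : j = i ∧ c'.toNat = c.toNat
            · obtain ⟨hji, hcc⟩ := hsame
              subst hji
              have hc'c : c' = c := by omega
              subst hc'c
              rw [pvDpGet_set_self _ _ _ _ (by omega) (by rw [hrowlen]; exact hcnat)]
              exact hG
            · have hsame' : j ≠ i ∨ c'.toNat ≠ c.toNat := by tauto
              rw [pvDpGet_set_ne _ _ _ _ _ _ hsame'] at hpos ⊢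
              exact h2inv.2.2 j c' hj hc1' hck' hpos

-- ---- B side ----
theorem getD_set_self_int (l : List Int) (m : Nat) (a : Int) (h : m < l.length) :
    (l.set m a).getD m 0 = a := by
  simp [List.getD, List.getElem?_set_self h]

theorem getD_set_ne_int (l : List Int) (m m' : Nat) (a : Int) (h : m' ≠ m) :
    (l.set m a).getD m' 0 = l.getD m' 0 := by
  simp only [List.getD, List.getElem?_set]
  rw [if_neg (by omega)]

theorem getD_replicate_zero (n m : Nat) :
    (List.replicate n (0:Int)).getD m 0 = 0 := by
  simp only [List.getD, List.getElem?_replicate]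
  split_ifs <;> rfl

theorem rowFold_spec (v : Int → Int) (K : Nat) :
    ∀ (t : Nat), t ≤ K →
      ((PySem.List.pyRange 1 ((t:Int)+1) 1).foldl (fun row c => row.set c.toNat (v c))
          (List.replicate (K+1) (0:Int))).length = K+1 ∧
      ∀ m : Nat, m < K+1 →
        ((PySem.List.pyRange 1 ((t:Int)+1) 1).foldl (fun row c => row.set c.toNat (v c))
            (List.replicate (K+1) (0:Int))).getD m 0 = if 1 ≤ m ∧ m ≤ t then v (m:Int) else 0 := by
  intro t
  induction t with
  | zero =>
    intro _
    rw [PySem.List.pyRange_one_eq_nil (by omega)]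
    refine ⟨by simp, ?_⟩
    intro m hm
    rw [if_neg (by omega)]
    simp only [List.foldl_nil]
    exact getD_replicate_zero (K+1) m
  | succ t iht =>
    intro ht
    obtain ⟨ihlen, ihget⟩ := iht (by omega)
    have hsplit : PySem.List.pyRange 1 (((t+1:Nat):Int)+1) 1
        = PySem.List.pyRange 1 ((t:Int)+1) 1 ++ [(t:Int)+1] := by
      have : (((t+1:Nat):Int)+1) = ((t:Int)+1)+1 := by push_cast; ring
      rw [this]
      exact PySem.List.pyRange_one_succ_right (by omega)
    rw [hsplit, List.foldl_append]
    simp only [List.foldl_cons, List.foldl_nil]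
    have htn : ((t:Int)+1).toNat = t+1 := by omega
    constructor
    · rw [List.length_set, ihlen]
    · intro m hm
      by_cases hmt : m = t+1
      · subst hmt
        rw [htn, getD_set_self_int _ _ _ (by rw [ihlen]; omega)]
        rw [if_pos (by omega)]
        congr 1
      · rw [htn, getD_set_ne_int _ _ _ _ hmt, ihget m hm]
        by_cases hc : 1 ≤ m ∧ m ≤ t
        · rw [if_pos hc, if_pos (by omega)]
        · rw [if_neg hc, if_neg (by omega)]

-- the bottom-up table invariant: rows i..n already hold the DP values
def pvTInv (es : List (List Int)) (k : Int) (i : Nat) (g : List (List Int)) : Prop :=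
  g.length = es.length + 1 ∧
  (∀ j, j ≤ es.length → (g.getD j []).length = (k+1).toNat) ∧
  (∀ (j : Nat) (c : Int), i ≤ j → j ≤ es.length → 0 ≤ c → c ≤ k → pvG2 g j c = pvG es j c.toNat)

theorem getDrow_set_self (g : List (List Int)) (i : Nat) (row : List Int) (h : i < g.length) :
    (g.set i row).getD i [] = row := by
  simp [List.getD, List.getElem?_set_self h]

theorem getDrow_set_ne (g : List (List Int)) (i j : Nat) (row : List Int) (h : j ≠ i) :
    (g.set i row).getD j [] = g.getD j [] := by
  simp only [List.getD, List.getElem?_set]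
  rw [if_neg (by omega)]

theorem pvBStep_preserves (es : List (List Int)) (k : Int) (hk : 0 ≤ k)
    (hmono : (pvStarts es).Pairwise (· ≤ ·)) (i : Nat) (hi : i < es.length)
    (g : List (List Int)) (hT : pvTInv es k (i+1) g) :
    pvTInv es k i (pvBStep es k g (i : Int)) := by
  obtain ⟨hglen, hrows, hvals⟩ := hT
  have hkc : ((k.toNat : Int)) = k := Int.toNat_of_nonneg (by omega)
  have hkc2 : (k+1).toNat = k.toNat + 1 := by omega
  set nxt := (i + 1) + PySem.List.bisectRight
      ((es.map (fun e => e.getD 0 0)).drop (i+1)) ((es.getD i []).getD 1 0) with hnxtdef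
  have hnxt : nxt = pvSkip es (pvA_get es i 1) (i+1) := by
    simp [hnxtdef, pvSkip, pvStarts, pvA_get]
  have hnxt1 : i+1 ≤ nxt := by rw [hnxt]; exact pvSkip_ge es (pvA_get es i 1) (i+1)
  have hnxt2 : nxt ≤ es.length := by
    rw [hnxt]; exact pvSkip_le es (pvA_get es i 1) (i+1) hmono (by omega)
  set v : Int → Int := fun c =>
    let take := (es.getD i []).getD 2 0 + pvG2 g nxt (c-1)
    let skip := pvG2 g (i+1) c
    if skip < take then take else skip with hv
  have hrow := rowFold_spec v k.toNat k.toNat le_rfl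
  rw [hkc, ← hkc2] at hrow
  obtain ⟨hrlen, hrget⟩ := hrow
  show pvTInv es k i (g.set i ((PySem.List.pyRange 1 (k+1) 1).foldl
      (fun row c => row.set c.toNat (v c)) (List.replicate (k+1).toNat 0)))
  set row := (PySem.List.pyRange 1 (k+1) 1).foldl
      (fun row c => row.set c.toNat (v c)) (List.replicate (k+1).toNat 0) with hrowdef
  refine ⟨by rw [List.length_set]; exact hglen, ?_, ?_⟩
  · intro j hj
    by_cases hji : j = i
    · subst hji
      rw [getDrow_set_self g j row (by omega)]
      exact hrlen
    · rw [getDrow_set_ne g i j row hji]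
      exact hrows j hj
  · intro j c hij hjn hc0 hck
    simp only [pvG2]
    by_cases hji : j = i
    · subst hji
      rw [getDrow_set_self g j row (by omega)]
      rw [hrget c.toNat (by omega)]
      by_cases hc1 : 1 ≤ c.toNat
      · rw [if_pos ⟨hc1, by omega⟩]
        have hcc : ((c.toNat : Int)) = c := by omega
        rw [hcc]
        have hskipv : pvG2 g (j+1) c = pvG es (j+1) c.toNat :=
          hvals (j+1) c le_rfl (by omega) hc0 hck
        have htakev : pvG2 g nxt (c-1) = pvG es nxt (c-1).toNat :=
          hvals nxt (c-1) hnxt1 hnxt2 (by omega) (by omega)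
        show (if pvG2 g (j+1) c < (es.getD j []).getD 2 0 + pvG2 g nxt (c-1)
              then (es.getD j []).getD 2 0 + pvG2 g nxt (c-1)
              else pvG2 g (j+1) c) = pvG es j c.toNat
        rw [hskipv, htakev, hnxt]
        rw [pvG_step es j c.toNat hi (by omega)]
        have hc1' : (c-1).toNat = c.toNat - 1 := by omega
        rw [hc1']
        show (if _ < pvA_get es j 2 + _ then pvA_get es j 2 + _ else _) = _
        split_ifs with hlt
        · rw [max_eq_right hlt.le]
        · rw [max_eq_left (not_lt.mp hlt)]
      · rw [if_neg (by omega)]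
        rw [pvG_base es j c.toNat (Or.inr (by omega))]
    · rw [getDrow_set_ne g i j row hji]
      exact hvals j c (by omega) hjn hc0 hck

theorem pvBFold (es : List (List Int)) (k : Int) (hk : 0 ≤ k)
    (hmono : (pvStarts es).Pairwise (· ≤ ·)) :
    ∀ (m : Nat), m ≤ es.length → ∀ g, pvTInv es k m g →
      pvTInv es k 0 ((PySem.List.pyRange ((m:Int)-1) (-1) (-1)).foldl (pvBStep es k) g) := by
  intro m
  induction m with
  | zero =>
    intro _ g hg
    rw [PySem.List.pyRange_neg_one_eq_nil (by omega)]
    exact hg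
  | succ m ihm =>
    intro hm g hg
    have hcast : ((m+1:Nat):Int) - 1 = (m:Int) := by push_cast; ring
    rw [hcast, PySem.List.pyRange_neg_one_cons (by omega)]
    rw [List.foldl_cons]
    apply ihm (by omega)
    exact pvBStep_preserves es k hk hmono m (by omega) g hg

-- ===== VERDICT (by name: the statement is the Claim_ definition above) =====
theorem maxValue_top_down_no_bin_search_spec : Claim_equal_maxValue_top_down_no_bin_search := by
  unfold Claim_equal_maxValue_top_down_no_bin_search Spec_maxValue_top_down_no_bin_search
  intro events k _ hpre
  obtain ⟨hk0, hrest⟩ := hpre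
  by_cases hk : k ≤ 0
  · -- k = 0: both sides are 0
    have hkeq : k = 0 := by omega
    subst hkeq
    unfold maxValue_top_down_no_bin_search maxValue_top_down_no_bin_search_alt
    rw [if_pos (le_refl (0:Int))]
    cases hn : events.length with
    | zero => simp [pvDfsA]
    | succ m => simp [pvDfsA]
  · have hk1 : (1:Int) ≤ k := by omega
    have hlen3 : ∀ e ∈ events, 3 ≤ e.length := by
      rcases hrest with h | h
      · omega
      · exact h
    have hmono := pvStarts_mono events hlen3
    set es := PySem.List.sorted events (fun e => e) false with hes
    have hlen : es.length = events.length := PySem.List.length_sorted events _ false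
    have hInv0 : pvInv es k (List.replicate events.length (List.replicate (k+1).toNat (-1))) := by
      refine ⟨by simp [hlen], ?_, ?_⟩
      · intro j hj
        have hjlt : j < events.length := by omega
        simp [List.getD, hjlt]
      · intro j c hj h1 hck hpos
        exfalso
        have hval : pvDpGet (List.replicate events.length
            (List.replicate (k+1).toNat (-1:Int))) j c = -1 := by
          unfold pvDpGet
          simp only [List.getD, List.getElem?_replicate]
          split_ifs <;> simp [List.getElem?_replicate] <;> split_ifs <;> rfl
        omega
    have hA := (pvDfsA_main es k hmono events.length 0 k (-1)
      (List.replicate events.length (List.replicate (k+1).toNat (-1)))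
      (by omega) (by omega) hk0 le_rfl hInv0).1
    have hkk0 : (0:Int) ≤ min k (es.length : Int) := le_min (by omega) (by omega)
    have hT0 : pvTInv es (min k (es.length : Int)) es.length
        (List.replicate (es.length+1)
          (List.replicate ((min k (es.length : Int))+1).toNat (0:Int))) := by
      refine ⟨by simp, ?_, ?_⟩
      · intro j hj
        have hjlt : j < es.length + 1 := by omega
        simp [List.getD, hjlt]
      · intro j c hij hjn hc0 hck
        have hj : j = es.length := by omega
        subst hj
        unfold pvG2
        rw [pvG_base es es.length c.toNat (Or.inl le_rfl)]
        simp only [List.getD, List.getElem?_replicate]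
        split_ifs <;> simp [List.getElem?_replicate] <;> split_ifs <;> rfl
    have hB := pvBFold es (min k (es.length : Int)) hkk0 hmono es.length le_rfl _ hT0
    unfold maxValue_top_down_no_bin_search maxValue_top_down_no_bin_search_alt
    rw [if_neg hk]
    show (pvDfsA es (List.replicate events.length (List.replicate (k+1).toNat (-1)))
            0 k (-1) events.length).1
       = pvG2 ((PySem.List.pyRange ((es.length:Int)-1) (-1) (-1)).foldl
              (pvBStep es (min k (es.length : Int)))
              (List.replicate (es.length+1)
                (List.replicate ((min k (es.length : Int))+1).toNat 0)))
            (PySem.List.bisectRight (es.map (fun e => e.getD 0 0)) (-1))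
            (min k (es.length : Int))
    rw [hA]
    have hbs : PySem.List.bisectRight (es.map (fun e => e.getD 0 0)) (-1)
        = pvSkip es (-1) 0 := by simp [pvSkip, pvStarts]
    rw [hbs]
    have hfin := hB.2.2 (pvSkip es (-1) 0) (min k (es.length : Int)) (by omega)
      (pvSkip_le es (-1) 0 hmono (by omega)) hkk0 le_rfl
    rw [hfin]
    -- the capped budget min(k, n) gives the same DP value (saturation)
    by_cases hkn : k ≤ (es.length : Int)
    · rw [min_eq_left hkn]
    · rw [min_eq_right (by omega)]
      exact pvG_sat es es.length (pvSkip es (-1) 0) k.toNat ((es.length : Int)).toNat (by omega)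
        (by omega) (by omega)
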